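-- pv_equiv track=rewrite | github.com/ChroniclesStudio/money-and-honour | src/yael_util.py | y_find_sequence_range
-- ===== SOURCE A (Python) =====
-- def y_find_sequence(tree,sequence,offset=0):
--     '''
--     Finds start-index of exact occurrence of SEQUENCE in TREE.
--
--     OFFSET items at the beginning are skipped (default 0).
--     '''
--     sequence = tuple(sequence)
--     for idx in range(offset, len(tree)-len(sequence)+1):
--         tree_sequence = tuple(tree[idx:idx+len(sequence)])
--         if tree_sequence == sequence:
--             return idx
--     raise KeyError('Sequence not in tree', sequence)
--
-- def y_find_sequence_range(tree,pattern):
--     '''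
--     Returns (CONTENT,STARTINDEX,ENDINDEX) corresponding to PATTERN.
--
--     PATTERN may contain '*' items, which delimit sequences to look
--     for, e.g.
--
--         ((try_begin),
--          (do_stuff),
--          '*',
--          (something),
--          '*',
--          (try_end))
--     '''
--     parts = [[]]
--     for item in pattern:
--         if item == '*':
--             parts.append([])
--         else:
--             parts[-1].append(item)
--     start = y_find_sequence(tree,parts[0])
--     end = start + len(parts[0])
--     for part in parts[1:]:
--         part_start = y_find_sequence(tree, part, end)
--         end = part_start + len(part)
--     content = tree[start:end]
--     return content,start,end
-- ===== SOURCE B (Python) =====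
-- def y_find_sequence_range(tree, pattern):
--     '''
--     Returns (CONTENT,STARTINDEX,ENDINDEX) corresponding to PATTERN.
--
--     Same contract as the original, but each segment is located by
--     consulting a precomputed position index of the tree items, so only
--     offsets where the segment's first item actually occurs are tried.
--     '''
--     # split pattern into '*'-delimited segments
--     parts, cur = [], []
--     for item in pattern:
--         if item == '*':
--             parts.append(cur)
--             cur = []
--         else:
--             cur.append(item)
--     parts.append(cur)
--     # position index: item -> sorted list of its positions in tree
--     index = {}
--     for i, item in enumerate(tree):
--         index.setdefault(item, []).append(i)
--     n = len(tree)
--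
--     def find(part, off):
--         if not part:
--             return off
--         m = len(part)
--         for i in index.get(part[0], []):
--             if i >= off and i + m <= n and tree[i:i + m] == part:
--                 return i
--         raise KeyError('Sequence not in tree', tuple(part))
--
--     start = find(parts[0], 0)
--     end = start + len(parts[0])
--     for part in parts[1:]:
--         end = find(part, end) + len(part)
--     return tree[start:end], start, end
-- ===== Notes on version B (the rewrite author's own statement) =====
-- stated objective: alternative
-- what changed: B locates each '*'-delimited segment by scanning a precomputed item-to-positions index of the tree (only offsets where the segment's first item actually occurs are tried, after one indexing pass), instead of re-comparing the segment at every offset.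
import Mathlib
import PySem

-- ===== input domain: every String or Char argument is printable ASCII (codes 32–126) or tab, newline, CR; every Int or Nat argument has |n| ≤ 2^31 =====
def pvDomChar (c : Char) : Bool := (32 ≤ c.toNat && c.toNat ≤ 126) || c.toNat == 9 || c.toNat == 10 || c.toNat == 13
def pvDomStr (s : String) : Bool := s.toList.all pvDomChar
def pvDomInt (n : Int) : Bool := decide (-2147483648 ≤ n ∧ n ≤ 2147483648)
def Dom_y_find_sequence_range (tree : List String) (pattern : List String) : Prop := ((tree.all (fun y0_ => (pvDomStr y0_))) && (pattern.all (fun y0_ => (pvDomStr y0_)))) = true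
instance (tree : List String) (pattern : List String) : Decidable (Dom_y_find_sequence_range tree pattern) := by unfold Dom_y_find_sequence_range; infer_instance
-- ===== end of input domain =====

-- B locates each '*'-delimited segment via a precomputed item→positions index of the tree
-- (only offsets where the segment's first item occurs are tried) instead of rescanning
-- every offset; objective: alternative algorithm, same return value.

-- ===== PORT A =====
-- y_find_sequence: none = Python's KeyError (excluded by Pre_)
def yFindSeqA (tree : List String) (sequence : List String) (offset : Int) : Option Int :=
  (PySem.List.pyRange offset ((tree.length : Int) - (sequence.length : Int) + 1) 1).findSome?
    (fun idx =>
      if PySem.List.slice tree (some idx) (some (idx + (sequence.length : Int))) == sequence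
      then some idx else none)

-- parts[-1].append(item)
def yAppendLastA : List (List String) → String → List (List String)
  | [], _ => []
  | [p], item => [p ++ [item]]
  | p :: q :: rest, item => p :: yAppendLastA (q :: rest) item

def yPartsA (pattern : List String) : List (List String) :=
  pattern.foldl (fun parts item =>
    if item == "*" then parts ++ [[]] else yAppendLastA parts item) [[]]

-- the loop 'for part in parts[1:]' threading `end`; none = KeyError
def yChainA (tree : List String) (parts : List (List String)) (e : Int) : Option Int :=
  match parts with
  | [] => some e
  | part :: rest =>
    match yFindSeqA tree part e with
    | none => none
    | some ps => yChainA tree rest (ps + (part.length : Int))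

def y_find_sequence_range (tree : List String) (pattern : List String) : List String × Int × Int :=
  match yFindSeqA tree ((yPartsA pattern).headD []) 0 with
  | none => ([], 0, 0)   -- Python raises KeyError here (outside Pre_)
  | some start =>
    match yChainA tree (yPartsA pattern).tail (start + (((yPartsA pattern).headD []).length : Int)) with
    | none => ([], 0, 0) -- KeyError
    | some e => (PySem.List.slice tree (some start) (some e), start, e)

-- ===== PORT B =====
-- parts, cur accumulation; result parts + [cur]
def yPartsB (pattern : List String) : List (List String) :=
  (pattern.foldl (fun (st : List (List String) × List String) item =>
    if item == "*" then (st.1 ++ [st.2], []) else (st.1, st.2 ++ [item])) ([], [])).1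
  ++ [(pattern.foldl (fun (st : List (List String) × List String) item =>
    if item == "*" then (st.1 ++ [st.2], []) else (st.1, st.2 ++ [item])) ([], [])).2]

-- index.setdefault(item, []).append(i) over enumerate(tree)
def yIndexB (tree : List String) : PySem.Dict String (List Int) :=
  (PySem.List.enumerate tree).foldl (fun d p => d.modify p.2 [] (· ++ [p.1])) PySem.Dict.empty

-- find(part, off); none = Python's KeyError (outside Pre_)
def yFindB (tree : List String) (index : PySem.Dict String (List Int)) (part : List String) (off : Int) : Option Int :=
  match part with
  | [] => some off
  | x :: rest =>
    (index.getD x []).findSome? (fun i =>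
      if decide (off ≤ i) && decide (i + ((x :: rest).length : Int) ≤ (tree.length : Int))
         && (PySem.List.slice tree (some i) (some (i + ((x :: rest).length : Int))) == x :: rest)
      then some i else none)

def yChainB (tree : List String) (index : PySem.Dict String (List Int)) (parts : List (List String)) (e : Int) : Option Int :=
  match parts with
  | [] => some e
  | part :: rest =>
    match yFindB tree index part e with
    | none => none
    | some ps => yChainB tree index rest (ps + (part.length : Int))

def y_find_sequence_range_alt (tree : List String) (pattern : List String) : List String × Int × Int :=
  match yFindB tree (yIndexB tree) ((yPartsB pattern).headD []) 0 with
  | none => ([], 0, 0)   -- Python raises KeyError here (outside Pre_)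
  | some start =>
    match yChainB tree (yIndexB tree) (yPartsB pattern).tail (start + (((yPartsB pattern).headD []).length : Int)) with
    | none => ([], 0, 0) -- KeyError
    | some e => (PySem.List.slice tree (some start) (some e), start, e)

-- ===== PRECONDITION & SPEC =====
-- split of pattern at '*' items (for stating Pre_ only)
def pvSplit : List String → List (List String)
  | [] => [[]]
  | x :: xs =>
    if x == "*" then [] :: pvSplit xs
    else match pvSplit xs with
      | [] => [[x]]
      | p :: ps => (x :: p) :: ps

-- there is a placement of the segments in tree, in order, from offset off on:
-- each segment occurs literally at some position i ≥ off, the next one after its end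
def pvPlace (tree : List String) : List (List String) → Nat → Prop
  | [], _ => True
  | p :: ps, off => ∃ i ∈ List.range (tree.length + 1),
      off ≤ i ∧ (tree.drop i).take p.length = p ∧ pvPlace tree ps (i + p.length)

def pvPlaceDec (tree : List String) :
    (parts : List (List String)) → (off : Nat) → Decidable (pvPlace tree parts off)
  | [], _ => isTrue trivial
  | p :: ps, off => by
    haveI : DecidablePred (pvPlace tree ps) := fun o => pvPlaceDec tree ps o
    exact decidable_of_iff
      (∃ i ∈ List.range (tree.length + 1),
        off ≤ i ∧ (tree.drop i).take p.length = p ∧ pvPlace tree ps (i + p.length))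
      (by rw [pvPlace])

-- Pre_ excludes exactly the inputs on which A raises KeyError: it holds iff the
-- '*'-delimited segments of the pattern occur in the tree, in order, left to right.
def Pre_y_find_sequence_range (tree : List String) (pattern : List String) : Prop :=
  pvPlace tree (pvSplit pattern) 0
instance (tree : List String) (pattern : List String) : Decidable (Pre_y_find_sequence_range tree pattern) := by
  unfold Pre_y_find_sequence_range; exact pvPlaceDec tree (pvSplit pattern) 0

def pvWitness_y_find_sequence_range : List String × List String := (["a", "b", "c"], ["a", "*", "c"])

def Spec_y_find_sequence_range (tree : List String) (pattern : List String) (out : List String × Int × Int) : Prop := out = y_find_sequence_range_alt tree pattern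
instance (tree : List String) (pattern : List String) (out : List String × Int × Int) : Decidable (Spec_y_find_sequence_range tree pattern out) := by unfold Spec_y_find_sequence_range; infer_instance

-- ===== CLAIM (what is proved, stated in full; the proofs are below) =====
def Claim_equal_y_find_sequence_range : Prop := ∀ (tree : List String) (pattern : List String), Dom_y_find_sequence_range tree pattern → Pre_y_find_sequence_range tree pattern → Spec_y_find_sequence_range tree pattern (y_find_sequence_range tree pattern)

-- ===== LEMMAS AND PROOFS =====

theorem yAppendLastA_snoc (l : List (List String)) (c : List String) (item : String) :
    yAppendLastA (l ++ [c]) item = l ++ [c ++ [item]] := by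
  induction l with
  | nil => rfl
  | cons a l ih =>
    cases l with
    | nil => rfl
    | cons b l' => simpa [yAppendLastA] using ih

theorem parts_eq_aux (pattern : List String) :
    ∀ (l : List (List String)) (c : List String),
      pattern.foldl (fun parts item =>
        if item == "*" then parts ++ [[]] else yAppendLastA parts item) (l ++ [c])
      = (pattern.foldl (fun (st : List (List String) × List String) item =>
          if item == "*" then (st.1 ++ [st.2], []) else (st.1, st.2 ++ [item])) (l, c)).1
        ++ [(pattern.foldl (fun (st : List (List String) × List String) item =>
          if item == "*" then (st.1 ++ [st.2], []) else (st.1, st.2 ++ [item])) (l, c)).2] := by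
  induction pattern with
  | nil => intro l c; rfl
  | cons a pat ih =>
    intro l c
    simp only [List.foldl_cons]
    by_cases h : a = "*"
    · have hb : (a == "*") = true := by simp [h]
      simp only [hb, if_true]
      exact ih (l ++ [c]) []
    · have hb : (a == "*") = false := by simp [h]
      simp only [hb, Bool.false_eq_true, if_false, yAppendLastA_snoc]
      exact ih l (c ++ [a])

theorem parts_eq (pattern : List String) : yPartsA pattern = yPartsB pattern := by
  unfold yPartsA yPartsB
  simpa using parts_eq_aux pattern [] []

theorem index_getD (tree : List String) (x : String) :
    (yIndexB tree).getD x []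
      = (PySem.List.pyRange 0 (tree.length : Int) 1).filter
          (fun j => PySem.List.pyGetD tree j "" == x) := by
  have henum : PySem.List.enumerate tree
      = (PySem.List.pyRange 0 (tree.length : Int) 1).map
          (fun j => (j, PySem.List.pyGetD tree j "")) := by
    simpa using PySem.List.enumerate_eq_map_pyRange tree ""
  have hfold : (PySem.List.enumerate tree).foldl
        (fun d p => d.modify p.2 [] (· ++ [p.1])) PySem.Dict.empty
      = ((PySem.List.enumerate tree).map (fun p => (p.2, p.1))).foldl
          (fun d q => d.modify q.1 [] (· ++ [q.2])) PySem.Dict.empty := by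
    rw [List.foldl_map]
  unfold yIndexB
  rw [hfold, PySem.Dict.getD_foldl_modify_append, PySem.Dict.getD_empty, henum]
  simp [List.filter_map, List.map_map, Function.comp_def]

theorem slice_eq_part (tree : List String) (x : String) (rest : List String) (i : Int)
    (h0 : 0 ≤ i)
    (h : PySem.List.slice tree (some i) (some (i + ((x :: rest).length : Int))) = x :: rest) :
    i + ((x :: rest).length : Int) ≤ (tree.length : Int)
      ∧ PySem.List.pyGetD tree i "" = x := by
  have hm : (0:Int) ≤ i + ((x :: rest).length : Int) := by
    have := Int.natCast_nonneg ((x :: rest).length); omega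
  rw [PySem.List.slice_toNat tree h0 hm] at h
  have htn : (i + ((x :: rest).length : Int)).toNat - i.toNat = (x :: rest).length := by omega
  rw [htn] at h
  have hpos : (x :: rest).length = rest.length + 1 := List.length_cons ..
  have hlen : (x :: rest).length ≤ (tree.drop i.toNat).length := by
    have hc := congrArg List.length h
    simp only [List.length_take] at hc
    omega
  have hdl : (tree.drop i.toNat).length = tree.length - i.toNat := List.length_drop
  have hbound : i + ((x :: rest).length : Int) ≤ (tree.length : Int) := by omega
  refine ⟨hbound, ?_⟩
  have hsplit : tree.drop i.toNat
      = (x :: rest) ++ (tree.drop i.toNat).drop (x :: rest).length := by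
    conv_lhs => rw [← List.take_append_drop (x :: rest).length (tree.drop i.toNat)]
    rw [h]
  have hget : tree[i.toNat]? = some x := by
    have h00 : (tree.drop i.toNat)[0]? = tree[i.toNat]? := by
      simp [List.getElem?_drop]
    rw [← h00, hsplit]
    rfl
  rw [PySem.List.pyGetD_of_nonneg tree "" h0, List.getD_eq_getElem?_getD, hget]
  rfl

theorem findSome?_if (l : List Int) (p : Int → Bool) :
    l.findSome? (fun i => if p i then some i else none) = l.find? p := by
  induction l with
  | nil => rfl
  | cons a l ih => by_cases h : p a <;> simp [h, ih]

theorem find_eq (tree : List String) (part : List String) (off : Int)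
    (h0 : 0 ≤ off) (hn : off ≤ (tree.length : Int)) :
    yFindSeqA tree part off = yFindB tree (yIndexB tree) part off := by
  cases part with
  | nil =>
    simp only [yFindSeqA, yFindB]
    simp only [List.length_nil, Nat.cast_zero, add_zero, sub_zero]
    rw [PySem.List.pyRange_one_cons (by omega)]
    rw [List.findSome?_cons]
    rw [PySem.List.slice_toNat tree h0 h0]
    simp
  | cons x rest =>
    simp only [yFindSeqA, yFindB]
    rw [index_getD]
    rw [findSome?_if, findSome?_if, ← List.head?_filter, ← List.head?_filter,
      List.filter_filter]
    congr 1
    have hm1 : ((x :: rest).length : Int) = (rest.length : Int) + 1 := by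
      simp [List.length_cons]
    refine List.Perm.eq_of_pairwise
      (fun a b _ _ h1 h2 => absurd h2 (lt_asymm h1))
      ((PySem.List.pairwise_lt_pyRange_one _ _).filter _)
      ((PySem.List.pairwise_lt_pyRange_one _ _).filter _)
      ((List.perm_ext_iff_of_nodup ((PySem.List.nodup_pyRange_one _ _).filter _)
        ((PySem.List.nodup_pyRange_one _ _).filter _)).mpr ?_)
    intro a
    simp only [List.mem_filter, PySem.List.mem_pyRange_one, Bool.and_eq_true,
      decide_eq_true_eq, beq_iff_eq]
    constructor
    · rintro ⟨⟨hoff, hlt⟩, hslice⟩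
      have h0a : (0:Int) ≤ a := le_trans h0 hoff
      obtain ⟨hbound, hhead⟩ := slice_eq_part tree x rest a h0a hslice
      exact ⟨⟨by omega, by omega⟩, ⟨⟨⟨hoff, hbound⟩, hslice⟩, hhead⟩⟩
    · rintro ⟨⟨ha0, han⟩, ⟨⟨⟨hoff, hbound⟩, hslice⟩, hhead⟩⟩
      exact ⟨⟨hoff, by omega⟩, hslice⟩

theorem findA_bounds (tree : List String) (part : List String) (off ps : Int)
    (h : yFindSeqA tree part off = some ps) :
    off ≤ ps ∧ ps + (part.length : Int) ≤ (tree.length : Int) := by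
  unfold yFindSeqA at h
  obtain ⟨a, ha, hfa⟩ := List.exists_of_findSome?_eq_some h
  rw [PySem.List.mem_pyRange_one] at ha
  split at hfa
  · obtain rfl := Option.some.inj hfa
    omega
  · exact absurd hfa (by simp)

theorem chain_eq (tree : List String) (parts : List (List String)) (e : Int)
    (h0 : 0 ≤ e) (hn : e ≤ (tree.length : Int)) :
    yChainA tree parts e = yChainB tree (yIndexB tree) parts e := by
  induction parts generalizing e with
  | nil => rfl
  | cons part rest ih =>
    simp only [yChainA, yChainB]
    rw [← find_eq tree part e h0 hn]
    cases h : yFindSeqA tree part e with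
    | none => rfl
    | some ps =>
      obtain ⟨h1, h2⟩ := findA_bounds tree part e ps h
      exact ih (ps + (part.length : Int)) (by omega) h2

-- ===== VERDICT (by name: the statement is the Claim_ definition above) =====
theorem y_find_sequence_range_spec : Claim_equal_y_find_sequence_range := by
  intro tree pattern _ _
  unfold Spec_y_find_sequence_range y_find_sequence_range y_find_sequence_range_alt
  rw [parts_eq]
  have hn0 : (0:Int) ≤ (tree.length : Int) := Int.natCast_nonneg _
  have hf := find_eq tree ((yPartsB pattern).headD []) 0 le_rfl hn0
  rw [hf]
  cases h : yFindB tree (yIndexB tree) ((yPartsB pattern).headD []) 0 with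
  | none => rfl
  | some start =>
    have hA : yFindSeqA tree ((yPartsB pattern).headD []) 0 = some start := hf.trans h
    obtain ⟨h1, h2⟩ := findA_bounds tree _ 0 start hA
    dsimp only
    rw [chain_eq tree ((yPartsB pattern).tail)
      (start + (((yPartsB pattern).headD []).length : Int)) (by omega) h2]
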